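-- pv_equiv track=rewrite | github.com/deboraos/Python | Introduction to Computer Science with Python Part 2/Week 6 - Recursion/elefantes.py | elefantes
-- ===== SOURCE A (Python) =====
-- def incomodam(n):
--     if (n > 0):
--         return "incomodam " + incomodam(n-1)
--     elif (n == 1):
--         return "incomodam "
--     else:
--         return ""
--
-- def elefantes(n):
--     if (n > 2):
--         return elefantes(n-1) + f"\n{n-1} elefantes incomodam muita gente" + f"\n{n} elefantes "+ incomodam(n) + "muito mais"
--     elif (n == 2):
--         return elefantes(n-1) + f"\n{n} elefantes "+ incomodam(n) + "muito mais"
--     elif (n == 1):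
--         return "Um elefante incomoda muita gente"
--     else:
--         return ""
-- ===== SOURCE B (Python) =====
-- def elefantes(n):
--     if n < 1:
--         return ""
--     pieces = ["Um elefante incomoda muita gente"]
--     for k in range(2, n + 1):
--         if k > 2:
--             pieces.append(f"\n{k-1} elefantes incomodam muita gente")
--         pieces.append(f"\n{k} elefantes " + "incomodam " * k + "muito mais")
--     return "".join(pieces)
-- ===== Notes on version B (the rewrite author's own statement) =====
-- stated objective: faster
-- what changed: Replaces the linear recursion (and the recursive helper incomodam) by a single explicit loop over range(2, n+1) that appends the verse pieces to a list (with 'incomodam '*k for the repetition) and joins them once.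
import Mathlib
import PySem

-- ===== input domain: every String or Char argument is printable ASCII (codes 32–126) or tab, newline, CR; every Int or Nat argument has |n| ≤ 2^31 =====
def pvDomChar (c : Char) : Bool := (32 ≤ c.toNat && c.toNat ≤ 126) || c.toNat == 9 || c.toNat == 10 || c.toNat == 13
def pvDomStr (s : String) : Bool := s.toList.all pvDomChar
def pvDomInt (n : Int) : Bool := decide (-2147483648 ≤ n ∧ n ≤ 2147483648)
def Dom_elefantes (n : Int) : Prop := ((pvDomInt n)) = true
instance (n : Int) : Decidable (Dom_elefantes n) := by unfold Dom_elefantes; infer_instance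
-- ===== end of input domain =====

-- B replaces A's linear recursion (and recursive helper incomodam) by one loop building a list of pieces joined at the end (objective: simpler).

-- ===== PORT A =====
def incomodam (n : Int) : String :=
  if n > 0 then "incomodam " ++ incomodam (n - 1)
  else if n == 1 then "incomodam "
  else ""
termination_by n.toNat
decreasing_by omega

def elefantes (n : Int) : String :=
  if n > 2 then
    elefantes (n - 1) ++ ("\n" ++ PySem.Int.toStr (n - 1) ++ " elefantes incomodam muita gente")
      ++ ("\n" ++ PySem.Int.toStr n ++ " elefantes ") ++ incomodam n ++ "muito mais"
  else if n == 2 then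
    elefantes (n - 1) ++ ("\n" ++ PySem.Int.toStr n ++ " elefantes ") ++ incomodam n ++ "muito mais"
  else if n == 1 then "Um elefante incomoda muita gente"
  else ""
termination_by n.toNat
decreasing_by all_goals (try simp only [beq_iff_eq] at *); all_goals omega

-- ===== PORT B =====
def elefantes_alt (n : Int) : String :=
  if n < 1 then ""
  else
    let pieces := (PySem.List.pyRange 2 (n + 1) 1).foldl (fun acc k =>
        let acc := if k > 2 then acc ++ ["\n" ++ PySem.Int.toStr (k - 1) ++ " elefantes incomodam muita gente"] else acc
        acc ++ ["\n" ++ PySem.Int.toStr k ++ " elefantes " ++ String.join (List.replicate k.toNat "incomodam ") ++ "muito mais"])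
      ["Um elefante incomoda muita gente"]
    String.join pieces

-- ===== PRECONDITION & SPEC =====
-- Pre_ excludes large n (n > 990), where Python A's deep recursion can exceed CPython's recursion
-- limit and raise RecursionError; the exact failing depth varies with the interpreter's stack state,
-- so the bound sits just below it. B's loop returns normally there.
def Pre_elefantes (n : Int) : Prop := n ≤ 990
instance (n : Int) : Decidable (Pre_elefantes n) := by unfold Pre_elefantes; infer_instance
def pvWitness_elefantes : Int := (7)
def Spec_elefantes (n : Int) (out : String) : Prop := out = elefantes_alt n
instance (n : Int) (out : String) : Decidable (Spec_elefantes n out) := by unfold Spec_elefantes; infer_instance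

-- ===== CLAIM (what is proved, stated in full; the proofs are below) =====
def Claim_equal_elefantes : Prop := ∀ (n : Int), Dom_elefantes n → Pre_elefantes n → Spec_elefantes n (elefantes n)

-- ===== LEMMAS AND PROOFS =====

theorem foldl_str (l : List String) (a b : String) :
    List.foldl (fun r s => r ++ s) (a ++ b) l = a ++ List.foldl (fun r s => r ++ s) b l := by
  induction l generalizing b with
  | nil => simp
  | cons c t ih => simp only [List.foldl, String.append_assoc, ih]

theorem join_cons (a : String) (l : List String) : String.join (a :: l) = a ++ String.join l := by
  have := foldl_str l a ""
  simp only [String.join, List.foldl]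
  simpa using this

theorem incomodam_eq (m : Nat) (n : Int) (h : n.toNat = m) :
    incomodam n = String.join (List.replicate m "incomodam ") := by
  induction m generalizing n with
  | zero =>
      unfold incomodam
      have h1 : ¬ n > 0 := by omega
      have h2 : ¬ n == 1 := by simp; omega
      simp [h1, h2, String.join]
  | succ m ih =>
      unfold incomodam
      have h1 : n > 0 := by omega
      rw [if_pos h1, ih (n - 1) (by omega), List.replicate_succ, join_cons]

theorem alt_one : elefantes_alt 1 = "Um elefante incomoda muita gente" := by
  unfold elefantes_alt
  rw [if_neg (by omega)]
  rw [show (1 : Int) + 1 = 2 from rfl, PySem.List.pyRange_one_eq_nil (le_refl 2)]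
  simp [String.join]

theorem alt_succ (n : Int) (h : 2 ≤ n) :
    elefantes_alt n = elefantes_alt (n - 1)
      ++ (if n > 2 then "\n" ++ PySem.Int.toStr (n - 1) ++ " elefantes incomodam muita gente" else "")
      ++ ("\n" ++ PySem.Int.toStr n ++ " elefantes " ++ String.join (List.replicate n.toNat "incomodam ") ++ "muito mais") := by
  unfold elefantes_alt
  rw [if_neg (by omega), if_neg (by omega)]
  simp only
  rw [PySem.List.pyRange_one_succ_right (by omega : (2:Int) ≤ n)]
  have hr : n - 1 + 1 = n := by omega
  rw [hr, List.foldl_append, List.foldl_cons, List.foldl_nil]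
  by_cases h3 : n > 2
  · rw [if_pos h3, if_pos h3]
    simp [String.join, String.append_assoc]
  · rw [if_neg h3, if_neg h3]
    simp [String.join, String.append_assoc]

theorem elefantes_eq (m : Nat) (n : Int) (h : n.toNat = m) (hn : 1 ≤ n) :
    elefantes n = elefantes_alt n := by
  induction m generalizing n with
  | zero => omega
  | succ m ih =>
    by_cases h2 : n > 2
    · unfold elefantes
      rw [if_pos h2, ih (n - 1) (by omega) (by omega),
          incomodam_eq n.toNat n rfl, alt_succ n (by omega), if_pos h2]
      simp [String.append_assoc]
    · by_cases he : n = 2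
      · subst he
        have hm : m = 1 := by omega
        subst hm
        unfold elefantes
        rw [if_neg (by omega), if_pos (by decide), show (2:Int) - 1 = 1 from rfl,
            ih 1 (by decide) (by decide), incomodam_eq 2 2 (by decide),
            alt_succ 2 (by omega), if_neg (by omega)]
        simp [show (2:Int) - 1 = 1 from rfl, alt_one, String.append_assoc]
      · have he1 : n = 1 := by omega
        subst he1
        unfold elefantes
        rw [if_neg (by decide), if_neg (by decide), if_pos (by decide), alt_one]

-- ===== VERDICT (by name: the statement is the Claim_ definition above) =====
theorem elefantes_spec : Claim_equal_elefantes := by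
  intro n _ _
  unfold Spec_elefantes
  by_cases hn : 1 ≤ n
  · exact elefantes_eq n.toNat n rfl hn
  · unfold elefantes elefantes_alt
    have h1 : ¬ n > 2 := by omega
    have h2 : ¬ n == 2 := by simp; omega
    have h3 : ¬ n == 1 := by simp; omega
    simp [h1, h2, h3, show n < 1 by omega]
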